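-- pv_equiv track=rewrite | github.com/luispc1989/intropy | 03_Plates/plates.py | numbers_at_end
-- ===== SOURCE A (Python) =====
-- def numbers_at_end(s):
--     # Encontra a posição do primeiro número
--     for i in range(len(s)):
--         if s[i].isdigit():
--             # Verifica se todos os caracteres após o primeiro número são números
--             if not s[i:].isdigit():
--                 return False
--             # Verifica se o primeiro número não é '0'
--             if s[i] == '0':
--                 return False
--             break
--     return True
-- ===== SOURCE B (Python) =====
-- def numbers_at_end(s):
--     # Scan backwards from the end to strip the maximal digit suffix, then
--     # require the remaining prefix to contain no digit at all and the suffix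
--     # not to start with '0'.
--     i = len(s)
--     while i > 0 and s[i-1].isdigit():
--         i -= 1
--     head, tail = s[:i], s[i:]
--     if any(c.isdigit() for c in head):
--         return False
--     return tail == '' or tail[0] != '0'
-- ===== Notes on version B (the rewrite author's own statement) =====
-- stated objective: alternative
-- what changed: Instead of scanning forward for the first digit and re-validating the slice with a bulk isdigit(), B scans backwards stripping the maximal digit suffix, then checks the remaining prefix is digit-free and the suffix does not start with '0'.
import Mathlib
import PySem

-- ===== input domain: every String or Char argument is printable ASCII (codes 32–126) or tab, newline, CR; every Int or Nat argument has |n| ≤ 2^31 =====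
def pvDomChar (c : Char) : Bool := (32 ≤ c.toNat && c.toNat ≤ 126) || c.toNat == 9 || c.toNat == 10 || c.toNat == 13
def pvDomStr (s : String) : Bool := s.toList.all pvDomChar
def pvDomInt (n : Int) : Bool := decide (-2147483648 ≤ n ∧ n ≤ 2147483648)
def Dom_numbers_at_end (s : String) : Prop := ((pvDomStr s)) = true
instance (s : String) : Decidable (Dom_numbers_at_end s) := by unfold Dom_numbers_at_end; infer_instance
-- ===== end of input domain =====

-- B scans backwards stripping the maximal digit suffix instead of A's forward find-first-digit plus bulk slice check; same values everywhere.

-- ===== PORT A =====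
-- A's loop over i in range(len(s)): the current suffix s[i:] is the state; s[i] is its head.
def numbersAtEndLoopA (cs : List Char) : Bool :=
  match cs with
  | [] => true
  | c :: rest =>
    if PySem.Chars.isdigit c then
      if !(PySem.Chars.strIsdigit (c :: rest)) then false
      else if c = '0' then false
      else true
    else numbersAtEndLoopA rest

def numbers_at_end (s : String) : Bool := numbersAtEndLoopA s.toList

-- ===== PORT B =====
-- B's backwards while loop 'while i > 0 and s[i-1].isdigit(): i -= 1' is the
-- dropWhile of digits over the REVERSED character list; head = s[:i], tail = s[i:].
def numbers_at_end_alt (s : String) : Bool :=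
  let r := s.toList.reverse
  let head := (r.dropWhile PySem.Chars.isdigit).reverse
  let tail := (r.takeWhile PySem.Chars.isdigit).reverse
  if head.any PySem.Chars.isdigit then false
  else
    match tail with
    | [] => true
    | c :: _ => decide (c ≠ '0')

-- ===== PRECONDITION & SPEC =====
def Spec_numbers_at_end (s : String) (out : Bool) : Prop := out = numbers_at_end_alt s
instance (s : String) (out : Bool) : Decidable (Spec_numbers_at_end s out) := by unfold Spec_numbers_at_end; infer_instance

-- ===== CLAIM (what is proved, stated in full; the proofs are below) =====
def Claim_equal_numbers_at_end : Prop := ∀ (s : String), Dom_numbers_at_end s → Spec_numbers_at_end s (numbers_at_end s)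

-- ===== LEMMAS AND PROOFS =====

lemma takeWhile_app (p : Char → Bool) (xs ys : List Char) :
    (xs ++ ys).takeWhile p = if xs.all p then xs ++ ys.takeWhile p else xs.takeWhile p := by
  induction xs with
  | nil => simp
  | cons x xs ih =>
    by_cases h : p x <;> simp [List.takeWhile, h, ih] <;> split_ifs <;> simp

lemma dropWhile_app (p : Char → Bool) (xs ys : List Char) :
    (xs ++ ys).dropWhile p = if xs.all p then ys.dropWhile p else xs.dropWhile p ++ ys := by
  induction xs with
  | nil => simp
  | cons x xs ih =>
    by_cases h : p x <;> simp [List.dropWhile, h, ih]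

-- unfolded body of B on a character list
def loopBval (cs : List Char) : Bool :=
  let r := cs.reverse
  let head := (r.dropWhile PySem.Chars.isdigit).reverse
  let tail := (r.takeWhile PySem.Chars.isdigit).reverse
  if head.any PySem.Chars.isdigit then false
  else
    match tail with
    | [] => true
    | c :: _ => decide (c ≠ '0')

lemma loopA_eq_loopBval (cs : List Char) : numbersAtEndLoopA cs = loopBval cs := by
  induction cs with
  | nil => rfl
  | cons c rest ih =>
    simp only [numbersAtEndLoopA, loopBval, List.reverse_cons,
      takeWhile_app, dropWhile_app] at *
    by_cases hall : rest.reverse.all PySem.Chars.isdigit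
    · have hall' : rest.all PySem.Chars.isdigit := by simpa using hall
      by_cases hd : PySem.Chars.isdigit c
      · -- all of rest digits, c digit: tail = c :: rest, head = []
        simp only [hall, if_pos, List.takeWhile, List.dropWhile, hd]
        simp [PySem.Chars.strIsdigit, hall']
        by_cases h0 : c = '0' <;> simp [h0, hd]
      · -- all of rest digits, c not a digit: tail = rest, head = [c]
        have hd' : PySem.Chars.isdigit c = false := by simpa using hd
        simp only [hall, if_pos, List.takeWhile, List.dropWhile, hd']
        simp [hd']
        cases rest with
        | nil => simp [numbersAtEndLoopA]
        | cons d r' =>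
          have hdd : PySem.Chars.isdigit d = true := by simp at hall'; exact hall'.1
          have hr' : r'.all PySem.Chars.isdigit := by simp at hall'; simpa using hall'.2
          by_cases h0 : d = '0'
          · subst h0
            simp [numbersAtEndLoopA, hdd, PySem.Chars.strIsdigit, hr']
          · simp [numbersAtEndLoopA, hdd, PySem.Chars.strIsdigit, hr', h0]
    · -- rest contains a non-digit somewhere (seen from the end)
      by_cases hd : PySem.Chars.isdigit c
      · -- A: first char is a digit but the whole is not all digits -> false
        have hnall : ¬ rest.all PySem.Chars.isdigit := by
          intro h; exact hall (by simpa using h)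
        simp [hd, hall, PySem.Chars.strIsdigit, hnall]
      · -- A recurses; B: head gains the trailing non-digit c, tail unchanged
        have hd' : PySem.Chars.isdigit c = false := by simpa using hd
        simp only [if_neg hall] at *
        simp [hd'] at ih ⊢
        rw [ih]

-- ===== VERDICT (by name: the statement is the Claim_ definition above) =====
theorem numbers_at_end_spec : Claim_equal_numbers_at_end := by
  intro s _
  unfold Spec_numbers_at_end numbers_at_end numbers_at_end_alt
  exact loopA_eq_loopBval s.toList
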